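-- pv_equiv track=rewrite | github.com/Grant-Syt/Python_Practice | array_manipulation.py | arrayManipulation_1
-- ===== SOURCE A (Python) =====
-- from collections import Counter
--
-- def arrayManipulation_1(n, queries):
--     # Counter is used for counting duplicate elements
--     # in strings and lists.
--     # In this case it is used as a dictionary, but
--     # it doesn't throw errors when assigning a value
--     # to a non existant key.
--     c = Counter()
--     for a,b,k in queries:
--         # We don't need to worry about a and b being
--         # 1-indexed, because we are just tracking the
--         # ups and downs with a dictionary.
--         c[a]  +=k
--         c[b+1]-=k
--     currSum = 0
--     maxSum = 0
--     # Using a dictionary saves us time here because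
--     # we don't need to iterate through the parts of
--     # the array where no changes happen.
--     # However, we do need to sort based on the keys
--     # to calculate the correct maxSum. In other
--     # words, we need to travese the changes in
--     # the order they would have in the array.
--     # We also cut off the last entry because it must
--     # be a "b" which is always subtraction.
--     for i in sorted(c)[:-1]:
--         currSum+= c[i]
--         maxSum = max(maxSum,currSum)
--     return maxSum
-- ===== SOURCE B (Python) =====
-- from bisect import bisect_right
--
-- def arrayManipulation_1(n, queries):
--     # Point evaluation instead of a sweep: the value of cell p is
--     # (total k added at starts <= p) minus (total k removed at ends < p).
--     # Precompute the sorted start and end positions with aligned prefix-sum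
--     # tables, then answer each candidate boundary (every a and b+1) with two
--     # binary searches; the running value can only peak at such a boundary,
--     # and the answer is never below 0.
--     incs = sorted(((a, k) for a, b, k in queries), key=lambda t: t[0])
--     decs = sorted(((b + 1, k) for a, b, k in queries), key=lambda t: t[0])
--     incpos = [p for p, _ in incs]
--     decpos = [p for p, _ in decs]
--     incpre = [0]
--     for _, k in incs:
--         incpre.append(incpre[-1] + k)
--     decpre = [0]
--     for _, k in decs:
--         decpre.append(decpre[-1] + k)
--     best = 0
--     for a, b, _k in queries:
--         for p in (a, b + 1):
--             v = incpre[bisect_right(incpos, p)] - decpre[bisect_right(decpos, p)]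
--             if v > best:
--                 best = v
--     return best
-- ===== Notes on version B (the rewrite author's own statement) =====
-- stated objective: alternative
-- what changed: A aggregates net deltas per position in a Counter, sorts the distinct keys and sweeps them with a running prefix sum and running max (dropping the last key); B never sweeps: it builds two sorted prefix-sum tables (starts and ends) and evaluates the cell value directly at each candidate boundary a and b+1 with two binary searches, taking the best (at least 0).
import Mathlib
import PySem

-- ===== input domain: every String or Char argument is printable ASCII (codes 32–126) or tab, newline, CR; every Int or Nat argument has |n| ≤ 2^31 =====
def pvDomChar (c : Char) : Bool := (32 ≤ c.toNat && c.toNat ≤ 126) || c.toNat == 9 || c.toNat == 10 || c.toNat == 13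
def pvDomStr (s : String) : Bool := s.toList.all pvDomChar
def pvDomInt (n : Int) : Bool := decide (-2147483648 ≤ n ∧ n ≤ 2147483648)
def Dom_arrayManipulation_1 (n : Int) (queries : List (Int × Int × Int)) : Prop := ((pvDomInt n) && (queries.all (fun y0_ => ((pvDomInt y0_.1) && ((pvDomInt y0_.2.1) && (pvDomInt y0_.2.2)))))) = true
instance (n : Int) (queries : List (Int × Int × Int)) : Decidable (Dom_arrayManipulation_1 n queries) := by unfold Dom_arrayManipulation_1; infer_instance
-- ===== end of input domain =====

-- B replaces A's Counter-plus-sorted-keys running sweep by direct point evaluation: two sorted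
-- prefix-sum tables answered by binary search at each query boundary; same return value, no speed claim.

-- ===== PORT A =====
def arrayManipulation_1 (n : Int) (queries : List (Int × Int × Int)) : Int :=
  let c := queries.foldl (fun c q =>
    let c := c.modify q.1 0 (fun v => v + q.2.2)
    c.modify (q.2.1 + 1) 0 (fun v => v - q.2.2)) (PySem.Dict.empty : PySem.Dict Int Int)
  let ks := PySem.List.slice (PySem.List.sorted c.keys (fun x => x) false) none (some (-1))
  let r := ks.foldl (fun (p : Int × Int) i =>
    let s := p.1 + c.getD i 0
    (s, max p.2 s)) ((0 : Int), (0 : Int))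
  r.2

-- ===== PORT B =====
def arrayManipulation_1_alt (n : Int) (queries : List (Int × Int × Int)) : Int :=
  let incs := PySem.List.sorted (queries.map (fun q => (q.1, q.2.2))) Prod.fst false
  let decs := PySem.List.sorted (queries.map (fun q => (q.2.1 + 1, q.2.2))) Prod.fst false
  let incpos := incs.map Prod.fst
  let decpos := decs.map Prod.fst
  let incpre := incs.foldl (fun pre e => pre ++ [PySem.List.pyGetD pre (-1) 0 + e.2]) [(0 : Int)]
  let decpre := decs.foldl (fun pre e => pre ++ [PySem.List.pyGetD pre (-1) 0 + e.2]) [(0 : Int)]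
  queries.foldl (fun best q =>
    [q.1, q.2.1 + 1].foldl (fun best p =>
      let v := PySem.List.pyGetD incpre ((PySem.List.bisectRight incpos p : Nat) : Int) 0
             - PySem.List.pyGetD decpre ((PySem.List.bisectRight decpos p : Nat) : Int) 0
      if v > best then v else best) best) 0

-- ===== PRECONDITION & SPEC =====
def Spec_arrayManipulation_1 (n : Int) (queries : List (Int × Int × Int)) (out : Int) : Prop := out = arrayManipulation_1_alt n queries
instance (n : Int) (queries : List (Int × Int × Int)) (out : Int) : Decidable (Spec_arrayManipulation_1 n queries out) := by unfold Spec_arrayManipulation_1; infer_instance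

-- ===== CLAIM (what is proved, stated in full; the proofs are below) =====
def Claim_equal_arrayManipulation_1 : Prop := ∀ (n : Int) (queries : List (Int × Int × Int)), Dom_arrayManipulation_1 n queries → Spec_arrayManipulation_1 n queries (arrayManipulation_1 n queries)

-- ===== LEMMAS AND PROOFS =====

-- the two boundary events of one query, and the whole event list
def pvEvs (q : Int × Int × Int) : List (Int × Int) := [(q.1, q.2.2), (q.2.1 + 1, -q.2.2)]
def pvE (queries : List (Int × Int × Int)) : List (Int × Int) := queries.flatMap pvEvs
-- net delta at position p
def pvNet (E : List (Int × Int)) (p : Int) : Int := ((E.filter (fun e => e.1 == p)).map Prod.snd).sum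
-- sum of the deltas of all events at positions ≤ p ("value of cell p")
def pvCov (E : List (Int × Int)) (p : Int) : Int := ((E.filter (fun e => decide (e.1 ≤ p))).map Prod.snd).sum
-- the sorted distinct positions
def pvP (E : List (Int × Int)) : List Int :=
  PySem.List.sorted (PySem.Set.ofList (E.map Prod.fst)) (fun x => x) false
-- the candidate boundaries B inspects
def pvCands (queries : List (Int × Int × Int)) : List Int :=
  queries.flatMap (fun q => [q.1, q.2.1 + 1])
-- the per-position step of A's second loop
def pvStepN (E : List (Int × Int)) (p : Int × Int) (i : Int) : Int × Int :=
  (p.1 + pvNet E i, max p.2 (p.1 + pvNet E i))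
-- dict step of A, event step of the dict fold
def pvStepA (d : PySem.Dict Int Int) (q : Int × Int × Int) : PySem.Dict Int Int :=
  (d.modify q.1 0 (fun v => v + q.2.2)).modify (q.2.1 + 1) 0 (fun v => v - q.2.2)
def pvStepE (d : PySem.Dict Int Int) (e : Int × Int) : PySem.Dict Int Int :=
  d.modify e.1 0 (fun v => v + e.2)
-- max-of-cov fold, the common normal form of both sides
def pvMaxFold (E : List (Int × Int)) (ps : List Int) (m : Int) : Int :=
  ps.foldl (fun acc p => max acc (pvCov E p)) m

lemma pv_dict_fold (queries : List (Int × Int × Int)) :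
    ∀ d, queries.foldl pvStepA d = (pvE queries).foldl pvStepE d := by
  induction queries with
  | nil => intro d; rfl
  | cons q t ih =>
    intro d
    show t.foldl pvStepA (pvStepA d q) = _
    rw [pvE, List.flatMap_cons, List.foldl_append, ih]
    have : pvStepA d q = (pvEvs q).foldl pvStepE d := by
      simp only [pvStepA, pvStepE, pvEvs, List.foldl_cons, List.foldl_nil, sub_eq_add_neg]
    rw [this]; rfl

lemma pv_getD_fold (E : List (Int × Int)) :
    ∀ d x, ((E.foldl pvStepE d).getD x 0) = d.getD x 0 + pvNet E x := by
  induction E with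
  | nil => intro d x; simp [pvNet]
  | cons e t ih =>
    intro d x
    show ((t.foldl pvStepE (pvStepE d e)).getD x 0) = _
    rw [ih]
    show (d.modify e.1 0 (fun v => v + e.2)).getD x 0 + pvNet t x = _
    rw [PySem.Dict.getD_modify]
    by_cases h : e.1 = x
    · subst h; simp [pvNet]; ring
    · simp [pvNet, h, Ne.symm h]

lemma pv_keys_fold (E : List (Int × Int)) :
    (E.foldl pvStepE PySem.Dict.empty).keys = PySem.Set.ofList (E.map Prod.fst) := by
  show ((E.foldl (fun d (e : Int × Int) => d.modify e.1 0 (fun v => v + e.2))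
      PySem.Dict.empty).keys) = _
  rw [PySem.Dict.keys_foldl_modify_key]
  simp [PySem.Dict.keys_empty, PySem.Set.update_nil_left]

lemma pv_sum_flatMap {α : Type} (l : List α) (f : α → List Int) :
    (l.flatMap f).sum = (l.map (fun a => (f a).sum)).sum := by
  induction l with
  | nil => rfl
  | cons a t ih => rw [List.flatMap_cons, List.sum_append, ih, List.map_cons, List.sum_cons]

lemma pv_filter_ne {α : Type} (key : α → Int) (E : List α) (q p : Int) (h : q ≠ p) :
    (E.filter (fun e => !(key e == p))).filter (fun e => key e == q)
      = E.filter (fun e => key e == q) := by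
  rw [List.filter_filter]
  apply List.filter_congr
  intro e _
  by_cases hk : key e = q
  · simp [hk, h]
  · simp [hk]

lemma pv_partition_perm {α : Type} (key : α → Int) (E : List α) :
    ∀ P : List Int, P.Nodup → (∀ e ∈ E, key e ∈ P) →
    (P.flatMap (fun p => E.filter (fun e => key e == p))).Perm E := by
  intro P
  induction P generalizing E with
  | nil =>
    intro _ h2
    have : E = [] := by
      cases E with
      | nil => rfl
      | cons a t => exact absurd (h2 a (by simp)) (by simp)
    subst this; simp
  | cons p P' ih =>
    intro hnd h2
    rw [List.flatMap_cons]
    have hcong : P'.flatMap (fun q => E.filter (fun e => key e == q))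
        = P'.flatMap (fun q => (E.filter (fun e => !(key e == p))).filter
            (fun e => key e == q)) := by
      apply List.flatMap_congr
      intro q hq
      exact (pv_filter_ne key E q p (fun hqp => (List.nodup_cons.mp hnd).1 (hqp ▸ hq))).symm
    rw [hcong]
    have hperm := ih (E := E.filter (fun e => !(key e == p))) (List.nodup_cons.mp hnd).2 ?_
    · exact ((List.Perm.append_left _ hperm).trans
        (List.filter_append_perm (fun e => key e == p) E))
    · intro e he
      have he' := List.mem_filter.mp he
      have := h2 e he'.1
      rcases List.mem_cons.mp this with hk | hk
      · exfalso; simp [hk] at he'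
      · exact hk

lemma pv_mem_fst_pvP (E : List (Int × Int)) : ∀ e ∈ E, e.1 ∈ pvP E := by
  intro e he
  simp only [pvP, PySem.List.mem_sorted, PySem.Set.mem_ofList]
  exact List.mem_map_of_mem he

lemma pvP_nodup (E : List (Int × Int)) : (pvP E).Nodup := by
  have h := PySem.List.sorted_perm (PySem.Set.ofList (E.map Prod.fst)) (fun x => x) false
  exact h.nodup_iff.mpr (PySem.Set.nodup_ofList _)

-- Σ over a complete nodup position list of the per-position nets = Σ of all filtered deltas
lemma pv_net_sum (E : List (Int × Int)) (P : List Int) (hnd : P.Nodup)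
    (hcov : ∀ e ∈ E, e.1 ∈ P) (p : Int) :
    ((P.filter (fun q => decide (q ≤ p))).map (pvNet E)).sum = pvCov E p := by
  set E' := E.filter (fun e => decide (e.1 ≤ p)) with hE'
  set P' := P.filter (fun q => decide (q ≤ p)) with hP'
  have hnet : ∀ q ∈ P', pvNet E q = pvNet E' q := by
    intro q hq
    have hqp : q ≤ p := by simpa using (List.mem_filter.mp hq).2
    rw [pvNet, pvNet, hE', List.filter_filter]
    congr 2
    refine (List.filter_congr ?_).symm
    intro e _
    by_cases he : e.1 = q
    · simp [he, hqp]
    · simp [he]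
  have hperm : (P'.flatMap (fun q => E'.filter (fun e => e.1 == q))).Perm E' := by
    refine pv_partition_perm Prod.fst E' P' (List.Nodup.filter _ hnd) ?_
    intro e he
    have he' := List.mem_filter.mp he
    exact List.mem_filter.mpr ⟨hcov e he'.1, he'.2⟩
  have hsum : (P'.map (pvNet E')).sum = (E'.map Prod.snd).sum := by
    rw [← (hperm.map Prod.snd).sum_eq, List.map_flatMap, pv_sum_flatMap]
    rfl
  rw [List.map_congr_left hnet, hsum]
  rfl

-- s + filtered-net-sum invariant turns A's sweep into a max-of-cov fold
lemma pv_fold_to_max (E : List (Int × Int)) :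
    ∀ (ps : List Int) (s m : Int), ps.Pairwise (· < ·) →
    (∀ p ∈ ps, s + ((ps.filter (fun q => decide (q ≤ p))).map (pvNet E)).sum = pvCov E p) →
    (ps.foldl (pvStepN E) (s, m)).2 = pvMaxFold E ps m := by
  intro ps
  induction ps with
  | nil => intro s m _ _; rfl
  | cons p t ih =>
    intro s m hpw h
    have hpw' := List.pairwise_cons.mp hpw
    have hhd : s + pvNet E p = pvCov E p := by
      have hp := h p (by simp)
      have hfe : (p :: t).filter (fun q => decide (q ≤ p)) = [p] := by
        rw [List.filter_cons_of_pos (by simp)]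
        rw [List.filter_eq_nil_iff.mpr ?_]
        intro q hq
        simp only [decide_eq_true_eq]
        exact not_le.mpr (hpw'.1 q hq)
      rw [hfe] at hp
      simpa using hp
    have hinv : ∀ p' ∈ t, (s + pvNet E p)
        + ((t.filter (fun q => decide (q ≤ p'))).map (pvNet E)).sum = pvCov E p' := by
      intro p' hp'
      have hle : p ≤ p' := le_of_lt (hpw'.1 p' hp')
      have := h p' (by simp [hp'])
      rw [List.filter_cons_of_pos (by simpa using hle)] at this
      simp only [List.map_cons, List.sum_cons] at this
      omega
    rw [List.foldl_cons,
      show pvStepN E (s, m) p = (s + pvNet E p, max m (s + pvNet E p)) from rfl,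
      ih (s + pvNet E p) (max m (s + pvNet E p)) hpw'.2 hinv, hhd]
    rfl

lemma pv_foldN_fst_snd (E : List (Int × Int)) (ps : List Int) :
    ∀ s m : Int, (ps.foldl (pvStepN E) (s, m)).1 = s + (ps.map (pvNet E)).sum
      ∧ m ≤ (ps.foldl (pvStepN E) (s, m)).2 := by
  induction ps with
  | nil => intro s m; simp
  | cons p t ih =>
    intro s m
    rw [List.foldl_cons]
    have := ih (s + pvNet E p) (max m (s + pvNet E p))
    refine ⟨?_, le_trans (le_max_left _ _) this.2⟩
    rw [show pvStepN E (s, m) p = (s + pvNet E p, max m (s + pvNet E p)) from rfl] at *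
    rw [this.1]
    simp; ring

lemma pv_dropLast_fold (E : List (Int × Int)) (ps : List Int)
    (h : (ps.map (pvNet E)).sum = 0) :
    (ps.dropLast.foldl (pvStepN E) (0, 0)).2 = (ps.foldl (pvStepN E) (0, 0)).2 := by
  rcases List.eq_nil_or_concat ps with rfl | ⟨init, a, rfl⟩
  · rfl
  · rw [List.concat_eq_append] at *
    rw [List.dropLast_concat, List.foldl_append, List.foldl_cons, List.foldl_nil]
    have hF := pv_foldN_fst_snd E init 0 0
    set F := init.foldl (pvStepN E) ((0 : Int), (0 : Int)) with hFdef
    have hsum : F.1 + pvNet E a = 0 := by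
      rw [hF.1]
      rw [List.map_append, List.sum_append] at h
      simpa using h
    show F.2 = (pvStepN E F a).2
    show F.2 = max F.2 (F.1 + pvNet E a)
    rw [hsum]
    omega

lemma pv_total_zero (queries : List (Int × Int × Int)) :
    ((pvE queries).map Prod.snd).sum = 0 := by
  induction queries with
  | nil => rfl
  | cons q t ih =>
    rw [pvE, List.flatMap_cons, List.map_append, List.sum_append]
    rw [show pvE t = t.flatMap pvEvs from rfl] at ih
    rw [ih]
    simp [pvEvs]

lemma pv_pvP_sum (E : List (Int × Int)) :
    ((pvP E).map (pvNet E)).sum = (E.map Prod.snd).sum := by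
  have hperm : ((pvP E).flatMap (fun q => E.filter (fun e => e.1 == q))).Perm E :=
    pv_partition_perm Prod.fst E (pvP E) (pvP_nodup E) (pv_mem_fst_pvP E)
  rw [← (hperm.map Prod.snd).sum_eq, List.map_flatMap, pv_sum_flatMap]
  rfl

-- max-of-cov fold depends only on the SET of positions
lemma pv_maxFold_le (E : List (Int × Int)) (ps : List Int) (m c : Int)
    (hm : m ≤ c) (h : ∀ p ∈ ps, pvCov E p ≤ c) : pvMaxFold E ps m ≤ c := by
  induction ps generalizing m with
  | nil => exact hm
  | cons p t ih =>
    exact ih _ (max_le hm (h p (by simp))) (fun q hq => h q (by simp [hq]))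

lemma pv_le_maxFold (E : List (Int × Int)) (ps : List Int) (m : Int) :
    m ≤ pvMaxFold E ps m ∧ ∀ p ∈ ps, pvCov E p ≤ pvMaxFold E ps m := by
  induction ps generalizing m with
  | nil => exact ⟨le_rfl, by simp⟩
  | cons p t ih =>
    have h := ih (max m (pvCov E p))
    refine ⟨le_trans (le_max_left _ _) h.1, ?_⟩
    intro q hq
    rcases List.mem_cons.mp hq with rfl | hq'
    · exact le_trans (le_max_right _ _) h.1
    · exact h.2 q hq' 

lemma pv_maxFold_set (E : List (Int × Int)) (ps qs : List Int) (m : Int)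
    (h : ∀ p : Int, p ∈ ps ↔ p ∈ qs) : pvMaxFold E ps m = pvMaxFold E qs m := by
  have h1 := pv_le_maxFold E ps m
  have h2 := pv_le_maxFold E qs m
  refine le_antisymm ?_ ?_
  · exact pv_maxFold_le E ps m _ h2.1 (fun p hp => h2.2 p ((h p).mp hp))
  · exact pv_maxFold_le E qs m _ h1.1 (fun p hp => h1.2 p ((h p).mpr hp))

-- ---- B side ----

-- the prefix-table loop is scanl
lemma pv_pre_scanl (l : List (Int × Int)) :
    ∀ (pre : List Int) (s : Int),
    l.foldl (fun pre e => pre ++ [PySem.List.pyGetD pre (-1) 0 + e.2]) (pre ++ [s])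
      = pre ++ List.scanl (fun a k => a + k) s (l.map Prod.snd) := by
  intro pre s
  induction l generalizing pre s with
  | nil => simp [List.scanl]
  | cons e t ih =>
    rw [List.foldl_cons, PySem.List.pyGetD_neg_one_append_singleton]
    rw [ih (pre ++ [s]) (s + e.2)]
    simp [List.scanl_cons]

-- indexing the scanl table
lemma pv_scanl_getD (ks : List Int) :
    ∀ (c : Nat) (s : Int), c ≤ ks.length →
    (List.scanl (fun a k => a + k) s ks).getD c 0 = s + (ks.take c).sum := by
  induction ks with
  | nil =>
    intro c s hc
    have : c = 0 := by simpa using hc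
    subst this
    simp [List.scanl]
  | cons k t ih =>
    intro c s hc
    cases c with
    | zero => simp [List.scanl_cons]
    | succ c' =>
      rw [List.scanl_cons]
      have h := ih c' (s + k) (by simpa using hc)
      rw [List.getD_cons_succ, h, List.take_succ_cons, List.sum_cons]
      ring

-- a predicate true exactly on the first c elements: filter = take c
lemma pv_filter_take_of_prefix {α : Type} (l : List α) (pr : α → Bool) (c : Nat)
    (hc : c ≤ l.length)
    (hin : ∀ j (hj : j < l.length), j < c → pr l[j] = true)
    (hout : ∀ j (hj : j < l.length), c ≤ j → pr l[j] = false) :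
    l.filter pr = l.take c := by
  induction l generalizing c with
  | nil => simp
  | cons a t ih =>
    cases c with
    | zero =>
      simp only [List.take_zero]
      rw [List.filter_eq_nil_iff]
      intro x hx
      obtain ⟨j, hj, rfl⟩ := List.mem_iff_getElem.mp hx
      simp [hout j hj (Nat.zero_le j)]
    | succ c' =>
      have ha : pr a = true := by
        have := hin 0 (by simp) (Nat.succ_pos c')
        simpa using this
      rw [List.filter_cons_of_pos ha, List.take_succ_cons]
      congr 1
      refine ih c' (by simpa using hc) ?_ ?_
      · intro j hj hjc
        have := hin (j + 1) (by simpa using Nat.succ_lt_succ hj) (Nat.succ_lt_succ hjc)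
        simpa using this
      · intro j hj hjc
        have := hout (j + 1) (by simpa using Nat.succ_lt_succ hj) (Nat.succ_le_succ hjc)
        simpa using this

-- a list whose fsts are sorted: filter (fst ≤ p) = take (bisectRight fsts p)
lemma pv_filter_eq_take (l : List (Int × Int)) (p : Int)
    (hs : (l.map Prod.fst).Pairwise (· ≤ ·)) :
    l.filter (fun e => decide (e.1 ≤ p)) = l.take (PySem.List.bisectRight (l.map Prod.fst) p) := by
  obtain ⟨hle, hin, hout⟩ := PySem.List.bisectRight_spec (l.map Prod.fst) p hs
  refine pv_filter_take_of_prefix l _ _ (by simpa using hle) ?_ ?_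
  · intro j hj hjc
    have := hin j (by simpa using hj) hjc
    simpa using this
  · intro j hj hjc
    have := hout j (by simpa using hj) hjc
    simp only [List.getElem_map] at this
    simp
    omega

-- B's table lookup computes the filtered sum over the original pair list
lemma pv_cell_eval (pairs : List (Int × Int)) (p : Int) :
    PySem.List.pyGetD
      ((PySem.List.sorted pairs Prod.fst false).foldl
        (fun pre e => pre ++ [PySem.List.pyGetD pre (-1) 0 + e.2]) [(0 : Int)])
      ((PySem.List.bisectRight ((PySem.List.sorted pairs Prod.fst false).map Prod.fst) p : Nat) : Int) 0
      = ((pairs.filter (fun e => decide (e.1 ≤ p))).map Prod.snd).sum := by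
  set l := PySem.List.sorted pairs Prod.fst false with hl
  have hs : (l.map Prod.fst).Pairwise (· ≤ ·) := PySem.List.sorted_map_key_pairwise pairs Prod.fst
  set c := PySem.List.bisectRight (l.map Prod.fst) p with hcdef
  have hle : c ≤ l.length := by
    have := (PySem.List.bisectRight_spec (l.map Prod.fst) p hs).1
    simpa using this
  have hpre : l.foldl (fun pre e => pre ++ [PySem.List.pyGetD pre (-1) 0 + e.2]) [(0 : Int)]
      = List.scanl (fun a k => a + k) 0 (l.map Prod.snd) := by
    have := pv_pre_scanl l [] 0
    simpa using this
  rw [hpre, PySem.List.pyGetD_natCast]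
  rw [pv_scanl_getD (l.map Prod.snd) c 0 (by simpa using hle)]
  rw [← List.map_take, ← pv_filter_eq_take l p hs]
  have hperm : (l.filter (fun e => decide (e.1 ≤ p))).Perm
      (pairs.filter (fun e => decide (e.1 ≤ p))) :=
    List.Perm.filter _ (PySem.List.sorted_perm pairs Prod.fst false)
  rw [(hperm.map Prod.snd).sum_eq]
  ring

-- cov of the event list, per query
lemma pv_cov_split (queries : List (Int × Int × Int)) (p : Int) :
    pvCov (pvE queries) p
      = (((queries.map (fun q => (q.1, q.2.2))).filter (fun e => decide (e.1 ≤ p))).map Prod.snd).sum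
      - (((queries.map (fun q => (q.2.1 + 1, q.2.2))).filter (fun e => decide (e.1 ≤ p))).map Prod.snd).sum := by
  induction queries with
  | nil => simp [pvCov, pvE]
  | cons q t ih =>
    rw [pvCov, pvE, List.flatMap_cons, List.filter_append, List.map_append, List.sum_append]
    rw [show (pvE t = t.flatMap pvEvs) from rfl] at ih
    rw [show (List.map Prod.snd (List.filter (fun e => decide (e.1 ≤ p))
        (t.flatMap pvEvs))).sum = pvCov (t.flatMap pvEvs) p from rfl, ih]
    simp only [List.map_cons, List.filter_cons, pvEvs]
    by_cases h1 : q.1 ≤ p <;> by_cases h2 : q.2.1 + 1 ≤ p <;>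
      simp [h1, h2] <;> ring

-- B is the max-of-cov fold over the candidate boundaries
lemma pv_B_eq (n : Int) (queries : List (Int × Int × Int)) :
    arrayManipulation_1_alt n queries = pvMaxFold (pvE queries) (pvCands queries) 0 := by
  simp only [arrayManipulation_1_alt]
  rw [← List.foldl_flatMap]
  rw [pvMaxFold, pvCands]
  apply PySem.List.foldl_congr_mem
  intro acc p _
  rw [pv_cell_eval (queries.map (fun q => (q.1, q.2.2))) p,
      pv_cell_eval (queries.map (fun q => (q.2.1 + 1, q.2.2))) p,
      ← pv_cov_split queries p]
  by_cases h : pvCov (pvE queries) p > acc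
  · rw [if_pos h, max_eq_right (le_of_lt h)]
  · rw [if_neg h, max_eq_left (not_lt.mp h)]

-- the part of A after the dict is built, as a function of the dict
def pvAshell (d : PySem.Dict Int Int) : Int :=
  ((PySem.List.slice (PySem.List.sorted d.keys (fun x => x) false) none (some (-1))).foldl
    (fun (p : Int × Int) i => (p.1 + d.getD i 0, max p.2 (p.1 + d.getD i 0))) (0, 0)).2

-- A is the max-of-cov fold over the sorted distinct positions
lemma pv_A_eq (n : Int) (queries : List (Int × Int × Int)) :
    arrayManipulation_1 n queries = pvMaxFold (pvE queries) (pvP (pvE queries)) 0 := by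
  have h0 : arrayManipulation_1 n queries = pvAshell (queries.foldl pvStepA PySem.Dict.empty) := rfl
  rw [pv_dict_fold queries PySem.Dict.empty] at h0
  have hget : ∀ x, ((pvE queries).foldl pvStepE PySem.Dict.empty).getD x 0
      = pvNet (pvE queries) x := by
    intro x
    rw [pv_getD_fold (pvE queries) PySem.Dict.empty x]
    simp [PySem.Dict.getD_empty]
  have hfun : (fun (p : Int × Int) (i : Int) =>
        (p.1 + ((pvE queries).foldl pvStepE PySem.Dict.empty).getD i 0,
         max p.2 (p.1 + ((pvE queries).foldl pvStepE PySem.Dict.empty).getD i 0)))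
      = pvStepN (pvE queries) := by
    funext p i
    rw [hget i]
    rfl
  unfold pvAshell at h0
  rw [pv_keys_fold (pvE queries), PySem.List.slice_to_neg_one, hfun] at h0
  rw [show PySem.List.sorted (PySem.Set.ofList ((pvE queries).map Prod.fst)) (fun x => x) false
      = pvP (pvE queries) from rfl] at h0
  rw [h0, pv_dropLast_fold (pvE queries) (pvP (pvE queries))
    (by rw [pv_pvP_sum, pv_total_zero])]
  refine pv_fold_to_max (pvE queries) (pvP (pvE queries)) 0 0
    (PySem.List.sorted_ofList_pairwise_lt _) ?_
  intro p hp
  rw [pv_net_sum (pvE queries) (pvP (pvE queries)) (pvP_nodup _) (pv_mem_fst_pvP _) p]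
  ring

lemma pv_mem_pvP_cands (queries : List (Int × Int × Int)) (p : Int) :
    p ∈ pvP (pvE queries) ↔ p ∈ pvCands queries := by
  rw [pvP, PySem.List.mem_sorted, PySem.Set.mem_ofList, pvCands, pvE]
  rw [List.map_flatMap]
  simp [pvEvs]

-- ===== VERDICT (by name: the statement is the Claim_ definition above) =====
theorem arrayManipulation_1_spec : Claim_equal_arrayManipulation_1 := by
  intro n queries _
  unfold Spec_arrayManipulation_1
  rw [pv_A_eq, pv_B_eq]
  exact pv_maxFold_set _ _ _ _ (pv_mem_pvP_cands queries)
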